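-- pv_equiv track=rewrite | github.com/csgear/competitive | usaco/chapter1/beads.py | max_beads_n
-- ===== SOURCE A (Python) =====
-- def max_beads_n(necklace):
--     '''using DP to archieve O(N)'''
--     # Duplicate the necklace to handle circularity
--     n = len(necklace)
--     s = necklace + necklace
--
--     # Initialize left and right DP arrays
--     # left[i][0] for 'r', left[i][1] for 'b'
--     left = [[0] * 2 for _ in range(2 * n + 1)]
--     # right[i][0] for 'r', right[i][1] for 'b'
--     right = [[0] * 2 for _ in range(2 * n + 1)]
--
--     # Fill the left array
--     for i in range(1, 2 * n + 1):
--         if s[i - 1] == 'r':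
--             left[i][0] = left[i - 1][0] + 1
--             left[i][1] = 0
--         elif s[i - 1] == 'b':
--             left[i][1] = left[i - 1][1] + 1
--             left[i][0] = 0
--         else:  # 'w' case
--             left[i][0] = left[i - 1][0] + 1
--             left[i][1] = left[i - 1][1] + 1
--
--     # Fill the right array
--     for i in range(2 * n - 1, -1, -1):
--         if s[i] == 'r':
--             right[i][0] = right[i + 1][0] + 1
--             right[i][1] = 0
--         elif s[i] == 'b':
--             right[i][1] = right[i + 1][1] + 1
--             right[i][0] = 0
--         else:  # 'w' case
--             right[i][0] = right[i + 1][0] + 1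
--             right[i][1] = right[i + 1][1] + 1
--
--     # Calculate the maximum beads
--     m = 0
--     for i in range(2 * n):
--         m = max(m, max(left[i][0], left[i][1]) + max(right[i][0], right[i][1]))
--     m = min(m, n)  # Ensure we do
--
--     return m
-- ===== SOURCE B (Python) =====
-- def _scan(chars):
--     """Count the longest wildcard-compatible run along chars (first fixes the
--     forbidden opposite color at the first non-white bead)."""
--     forbidden = None
--     cnt = 0
--     for c in chars:
--         if forbidden is None:
--             if c == 'r':
--                 forbidden = 'b'
--             elif c == 'b':
--                 forbidden = 'r'
--             cnt += 1
--         else: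
--             if c == forbidden:
--                 break
--             cnt += 1
--     return cnt
--
--
-- def max_beads_n(necklace):
--     # Per-split directional scans on the doubled necklace instead of DP arrays.
--     n = len(necklace)
--     s = necklace + necklace
--     best = 0
--     for i in range(2 * n):
--         best = max(best, _scan(s[:i][::-1]) + _scan(s[i:]))
--     return min(best, n)
-- ===== Notes on version B (the rewrite author's own statement) =====
-- stated objective: simpler
-- what changed: Replaces A's two DP arrays (left/right runs precomputed over the doubled necklace) with a direct per-split pair of backward/forward wildcard-run scans, eliminating all array allocation and index bookkeeping.
import Mathlib
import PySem

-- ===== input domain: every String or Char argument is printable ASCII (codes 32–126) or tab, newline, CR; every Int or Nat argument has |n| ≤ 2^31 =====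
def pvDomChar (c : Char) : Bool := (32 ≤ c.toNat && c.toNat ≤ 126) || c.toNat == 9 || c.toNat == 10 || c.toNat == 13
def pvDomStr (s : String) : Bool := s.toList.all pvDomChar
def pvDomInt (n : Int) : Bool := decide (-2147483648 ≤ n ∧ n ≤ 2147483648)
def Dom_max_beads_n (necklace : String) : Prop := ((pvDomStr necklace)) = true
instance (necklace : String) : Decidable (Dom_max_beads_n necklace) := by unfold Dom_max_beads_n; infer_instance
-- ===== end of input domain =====

-- B replaces A's left/right DP arrays over the doubled necklace by a direct
-- per-split pair of wildcard-run scans (simpler: no arrays, no index bookkeeping).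

-- ===== PORT A =====
-- one iteration of A's "fill the left array" loop (loop index i, reads s[i-1] and left[i-1], writes left[i]);
-- all indices are provably in range in the loop, so getD/set are exact.
def stepLeft (s : List Char) (left : List (Int × Int)) (i : Nat) : List (Int × Int) :=
  if s.getD (i - 1) ' ' = 'r' then left.set i ((left.getD (i - 1) (0, 0)).1 + 1, 0)
  else if s.getD (i - 1) ' ' = 'b' then left.set i (0, (left.getD (i - 1) (0, 0)).2 + 1)
  else left.set i ((left.getD (i - 1) (0, 0)).1 + 1, (left.getD (i - 1) (0, 0)).2 + 1)

-- one iteration of A's "fill the right array" loop (reads s[i] and right[i+1], writes right[i])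
def stepRight (s : List Char) (right : List (Int × Int)) (i : Nat) : List (Int × Int) :=
  if s.getD i ' ' = 'r' then right.set i ((right.getD (i + 1) (0, 0)).1 + 1, 0)
  else if s.getD i ' ' = 'b' then right.set i (0, (right.getD (i + 1) (0, 0)).2 + 1)
  else right.set i ((right.getD (i + 1) (0, 0)).1 + 1, (right.getD (i + 1) (0, 0)).2 + 1)

def max_beads_n (necklace : String) : Int :=
  let n := necklace.toList.length
  let s := necklace.toList ++ necklace.toList          -- s = necklace + necklace
  -- for i in range(1, 2*n+1): fill left
  let left := (List.range' 1 (2 * n)).foldl (stepLeft s) (List.replicate (2 * n + 1) ((0 : Int), (0 : Int)))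
  -- for i in range(2*n-1, -1, -1): fill right
  let right := ((List.range' 0 (2 * n)).reverse).foldl (stepRight s) (List.replicate (2 * n + 1) ((0 : Int), (0 : Int)))
  -- m = max over splits, then min(m, n)
  let m := (List.range (2 * n)).foldl (fun m i =>
      max m (max (left.getD i (0, 0)).1 (left.getD i (0, 0)).2 +
             max (right.getD i (0, 0)).1 (right.getD i (0, 0)).2)) 0
  min m (n : Int)

-- ===== PORT B =====
-- Source B's _scan loop: the Option carries the 'forbidden' color once fixed; break = return 0 more.
def scanLoop (forbidden : Option Char) : List Char → Int
  | [] => 0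
  | c :: cs =>
    match forbidden with
    | none =>
        if c = 'r' then 1 + scanLoop (some 'b') cs
        else if c = 'b' then 1 + scanLoop (some 'r') cs
        else 1 + scanLoop none cs
    | some f => if c = f then 0 else 1 + scanLoop (some f) cs

def max_beads_n_alt (necklace : String) : Int :=
  let n := necklace.toList.length
  let s := necklace.toList ++ necklace.toList
  -- best = max over splits of backward scan (s[:i][::-1]) + forward scan (s[i:])
  let best := (List.range (2 * n)).foldl (fun best i =>
      max best (scanLoop none ((s.take i).reverse) + scanLoop none (s.drop i))) 0
  min best (n : Int)

-- ===== PRECONDITION & SPEC =====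
def Spec_max_beads_n (necklace : String) (out : Int) : Prop := out = max_beads_n_alt necklace
instance (necklace : String) (out : Int) : Decidable (Spec_max_beads_n necklace out) := by unfold Spec_max_beads_n; infer_instance

-- ===== CLAIM (what is proved, stated in full; the proofs are below) =====
def Claim_equal_max_beads_n : Prop := ∀ (necklace : String), Dom_max_beads_n necklace → Spec_max_beads_n necklace (max_beads_n necklace)

-- ===== LEMMAS AND PROOFS =====

lemma scanLoop_nonneg (f : Option Char) (l : List Char) : 0 ≤ scanLoop f l := by
  induction l generalizing f with
  | nil => simp [scanLoop]
  | cons c cs ih =>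
    cases f with
    | none =>
      simp only [scanLoop]
      split_ifs <;> have := ih (some 'b') <;> have := ih (some 'r') <;> have := ih none <;> omega
    | some g =>
      simp only [scanLoop]
      split_ifs
      · omega
      · have := ih (some g); omega

-- the scan with a free color choice equals the better of the two fixed-forbidden scans
lemma scanLoop_none_eq_max (l : List Char) :
    scanLoop none l = max (scanLoop (some 'b') l) (scanLoop (some 'r') l) := by
  induction l with
  | nil => simp [scanLoop]
  | cons c cs ih =>
    by_cases hr : c = 'r'
    · have h1 := scanLoop_nonneg (some 'b') cs
      subst hr
      simp only [scanLoop]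
      simp only [reduceIte, Char.reduceEq]
      omega
    · by_cases hb : c = 'b'
      · have h1 := scanLoop_nonneg (some 'r') cs
        subst hb
        simp only [scanLoop]
        simp only [reduceIte, Char.reduceEq]
        omega
      · simp only [scanLoop, if_neg hr, if_neg hb, ih]
        omega

-- proof-side name for the left array after the first k loop iterations
def LA (s : List Char) (k : Nat) : List (Int × Int) :=
  (List.range' 1 k).foldl (stepLeft s) (List.replicate (s.length + 1) ((0 : Int), (0 : Int)))

lemma LA_inv (s : List Char) (k : Nat) (hk : k ≤ s.length) :
    (LA s k).length = s.length + 1 ∧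
    ∀ i : Nat, i ≤ k →
      (LA s k).getD i (0, 0) =
        (scanLoop (some 'b') ((s.take i).reverse), scanLoop (some 'r') ((s.take i).reverse)) := by
  induction k with
  | zero =>
    refine ⟨by simp [LA], ?_⟩
    intro i hi
    have : i = 0 := Nat.le_zero.mp hi
    subst this
    simp [LA, scanLoop]
  | succ k ih =>
    have hkl : k < s.length := hk
    obtain ⟨hlen, hval⟩ := ih (Nat.le_of_lt hkl)
    have hLA : LA s (k + 1) = stepLeft s (LA s k) (1 + k) := by
      unfold LA
      rw [List.range'_concat, List.foldl_append]
      simp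
    have hc : s.getD (1 + k - 1) ' ' = s[k] := by
      have h1 : 1 + k - 1 = k := by omega
      rw [h1, List.getD_eq_getElem?_getD, List.getElem?_eq_getElem hkl]
      rfl
    have htake : (s.take (k + 1)).reverse = s[k] :: (s.take k).reverse := by
      rw [List.take_add_one, List.getElem?_eq_getElem hkl]
      simp
    have hprev : (LA s k).getD (1 + k - 1) (0, 0) =
        (scanLoop (some 'b') ((s.take k).reverse), scanLoop (some 'r') ((s.take k).reverse)) := by
      have h1 : 1 + k - 1 = k := by omega
      rw [h1]; exact hval k le_rfl
    have hlen' : (LA s (k + 1)).length = s.length + 1 := by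
      rw [hLA]; unfold stepLeft
      split_ifs <;> simp [hlen]
    refine ⟨hlen', ?_⟩
    intro i hi
    rcases Nat.lt_or_ge i (k + 1) with h | h
    · -- i ≤ k : this entry is untouched by the (k+1)-st iteration
      have hi' : i ≤ k := Nat.lt_succ_iff.mp h
      have hne : ¬ (1 + k = i) := by omega
      have hgd : ∀ (L : List (Int × Int)) (v : Int × Int),
          (L.set (1 + k) v).getD i (0, 0) = L.getD i (0, 0) := by
        intro L v
        simp [List.getD_eq_getElem?_getD, hne]
      rw [hLA]; unfold stepLeft
      split_ifs <;> rw [hgd] <;> exact hval i hi'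
    · -- i = k + 1 : the freshly written entry
      have hik : i = k + 1 := by omega
      subst hik
      have hset : ∀ (v : Int × Int), ((LA s k).set (1 + k) v).getD (k + 1) (0, 0) = v := by
        intro v
        have h1 : (1 : Nat) + k = k + 1 := by omega
        have h2 : k + 1 < (LA s k).length := by omega
        rw [h1, List.getD_eq_getElem?_getD, List.getElem?_set_self h2]
        rfl
      rw [hLA]; unfold stepLeft
      rw [hc, hprev, htake]
      by_cases hr : s[k] = 'r'
      · rw [if_pos hr, hset, hr]
        simp only [scanLoop, reduceIte, Char.reduceEq]
        simp [Int.add_comm]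
      · by_cases hb : s[k] = 'b'
        · rw [if_neg hr, if_pos hb, hset, hb]
          simp only [scanLoop, reduceIte, Char.reduceEq]
          simp [Int.add_comm]
        · rw [if_neg hr, if_neg hb, hset]
          simp only [scanLoop, if_neg hr, if_neg hb]
          simp [Int.add_comm]

-- proof-side name for the right array after processing indices s.length-1 down to s.length-m
def RA (s : List Char) (m : Nat) : List (Int × Int) :=
  ((List.range' (s.length - m) m).reverse).foldl (stepRight s) (List.replicate (s.length + 1) ((0 : Int), (0 : Int)))

lemma RA_inv (s : List Char) (m : Nat) (hm : m ≤ s.length) :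
    (RA s m).length = s.length + 1 ∧
    ∀ i : Nat, s.length - m ≤ i → i ≤ s.length →
      (RA s m).getD i (0, 0) =
        (scanLoop (some 'b') (s.drop i), scanLoop (some 'r') (s.drop i)) := by
  induction m with
  | zero =>
    refine ⟨by simp [RA], ?_⟩
    intro i h1 h2
    have : i = s.length := by omega
    subst this
    simp [RA, scanLoop]
  | succ m ih =>
    have hml : m < s.length := hm
    obtain ⟨hlen, hval⟩ := ih (Nat.le_of_lt hml)
    -- the (m+1)-st processed index, counting from the right
    have ha : s.length - (m + 1) < s.length := by omega
    have hRA : RA s (m + 1) = stepRight s (RA s m) (s.length - (m + 1)) := by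
      unfold RA
      rw [List.range'_succ]
      have h2 : s.length - (m + 1) + 1 = s.length - m := by omega
      rw [h2]
      simp [List.foldl_append]
    have hc : s.getD (s.length - (m + 1)) ' ' = s[s.length - (m + 1)] := by
      rw [List.getD_eq_getElem?_getD, List.getElem?_eq_getElem ha]
      rfl
    have hdrop : s.drop (s.length - (m + 1)) =
        s[s.length - (m + 1)] :: s.drop (s.length - m) := by
      rw [List.drop_eq_getElem_cons ha]
      have h2 : s.length - (m + 1) + 1 = s.length - m := by omega
      rw [h2]
    have hprev : (RA s m).getD (s.length - (m + 1) + 1) (0, 0) =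
        (scanLoop (some 'b') (s.drop (s.length - m)), scanLoop (some 'r') (s.drop (s.length - m))) := by
      have h2 : s.length - (m + 1) + 1 = s.length - m := by omega
      rw [h2]; exact hval (s.length - m) le_rfl (by omega)
    have hlen' : (RA s (m + 1)).length = s.length + 1 := by
      rw [hRA]; unfold stepRight
      split_ifs <;> simp [hlen]
    refine ⟨hlen', ?_⟩
    intro i h1 h2
    rcases Nat.lt_or_ge (s.length - (m + 1)) i with h | h
    · -- i > the freshly written index: untouched this iteration
      have hne : ¬ (s.length - (m + 1) = i) := by omega
      have hgd : ∀ (L : List (Int × Int)) (v : Int × Int),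
          (L.set (s.length - (m + 1)) v).getD i (0, 0) = L.getD i (0, 0) := by
        intro L v
        simp [List.getD_eq_getElem?_getD, hne]
      rw [hRA]; unfold stepRight
      split_ifs <;> rw [hgd] <;> exact hval i (by omega) h2
    · -- i = the freshly written index
      have hia : i = s.length - (m + 1) := by omega
      subst hia
      have hset : ∀ (v : Int × Int),
          ((RA s m).set (s.length - (m + 1)) v).getD (s.length - (m + 1)) (0, 0) = v := by
        intro v
        have hlt : s.length - (m + 1) < (RA s m).length := by omega
        rw [List.getD_eq_getElem?_getD, List.getElem?_set_self hlt]
        rfl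
      rw [hRA]; unfold stepRight
      rw [hc, hprev, hdrop]
      by_cases hr : s[s.length - (m + 1)] = 'r'
      · rw [if_pos hr, hset, hr]
        simp only [scanLoop, reduceIte, Char.reduceEq]
        simp [Int.add_comm]
      · by_cases hb : s[s.length - (m + 1)] = 'b'
        · rw [if_neg hr, if_pos hb, hset, hb]
          simp only [scanLoop, reduceIte, Char.reduceEq]
          simp [Int.add_comm]
        · rw [if_neg hr, if_neg hb, hset]
          simp only [scanLoop, if_neg hr, if_neg hb]
          simp [Int.add_comm]

-- the two max-over-splits folds agree entry by entry
lemma folds_eq (s : List Char) (n : Nat) (hs : s.length = 2 * n) :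
    (List.range (2 * n)).foldl (fun m i =>
        max m (max (((List.range' 1 (2 * n)).foldl (stepLeft s)
                      (List.replicate (2 * n + 1) ((0 : Int), (0 : Int)))).getD i (0, 0)).1
                   (((List.range' 1 (2 * n)).foldl (stepLeft s)
                      (List.replicate (2 * n + 1) ((0 : Int), (0 : Int)))).getD i (0, 0)).2 +
               max ((((List.range' 0 (2 * n)).reverse).foldl (stepRight s)
                      (List.replicate (2 * n + 1) ((0 : Int), (0 : Int)))).getD i (0, 0)).1
                   ((((List.range' 0 (2 * n)).reverse).foldl (stepRight s)
                      (List.replicate (2 * n + 1) ((0 : Int), (0 : Int)))).getD i (0, 0)).2)) 0 =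
    (List.range (2 * n)).foldl (fun best i =>
        max best (scanLoop none ((s.take i).reverse) + scanLoop none (s.drop i))) 0 := by
  rw [← hs]
  have hla : (List.range' 1 s.length).foldl (stepLeft s)
      (List.replicate (s.length + 1) ((0 : Int), (0 : Int))) = LA s s.length := rfl
  have hra : ((List.range' 0 s.length).reverse).foldl (stepRight s)
      (List.replicate (s.length + 1) ((0 : Int), (0 : Int))) = RA s s.length := by
    unfold RA; rw [Nat.sub_self]
  rw [hla, hra]
  apply PySem.List.foldl_congr_mem
  intro acc i hi
  have hilt : i < s.length := List.mem_range.mp hi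
  rw [(LA_inv s s.length le_rfl).2 i (Nat.le_of_lt hilt),
      (RA_inv s s.length le_rfl).2 i (by omega) (Nat.le_of_lt hilt)]
  rw [scanLoop_none_eq_max, scanLoop_none_eq_max]

-- ===== VERDICT (by name: the statement is the Claim_ definition above) =====
theorem max_beads_n_spec : Claim_equal_max_beads_n := by
  intro necklace _
  unfold Spec_max_beads_n max_beads_n max_beads_n_alt
  simp only []
  congr 1
  apply folds_eq
  simp [two_mul]
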